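-- pv_equiv track=rewrite | github.com/shubhamsingh-s/ai-based-question-paper | src/classify.py | tag_questions_by_topic
-- ===== SOURCE A (Python) =====
-- from typing import List, Tuple
--
-- def tag_questions_by_topic(questions: List[str], topics: List[str]) -> List[Tuple[str, str]]:
--     tagged = []
--     for q in questions:
--         found = False
--         for topic in topics:
--             if topic.lower() in q.lower():
--                 tagged.append((q, topic))
--                 found = True
--                 break
--         if not found:
--             tagged.append((q, 'Unknown'))
--     return tagged
-- ===== SOURCE B (Python) =====
-- def tag_questions_by_topic(questions, topics):
--     lowered_qs = [q.lower() for q in questions]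
--     tags = ['Unknown'] * len(questions)
--     for topic in reversed(topics):
--         tl = topic.lower()
--         for i, ql in enumerate(lowered_qs):
--             if tl in ql:
--                 tags[i] = topic
--     return list(zip(questions, tags))
-- ===== Notes on version B (the rewrite author's own statement) =====
-- stated objective: alternative
-- what changed: B inverts the loop nesting: instead of A's per-question first-match scan with a break, B sweeps topic-major over the topics in reverse order, overwriting a tag array so that earlier topics win, then zips questions with their tags.
import Mathlib
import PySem

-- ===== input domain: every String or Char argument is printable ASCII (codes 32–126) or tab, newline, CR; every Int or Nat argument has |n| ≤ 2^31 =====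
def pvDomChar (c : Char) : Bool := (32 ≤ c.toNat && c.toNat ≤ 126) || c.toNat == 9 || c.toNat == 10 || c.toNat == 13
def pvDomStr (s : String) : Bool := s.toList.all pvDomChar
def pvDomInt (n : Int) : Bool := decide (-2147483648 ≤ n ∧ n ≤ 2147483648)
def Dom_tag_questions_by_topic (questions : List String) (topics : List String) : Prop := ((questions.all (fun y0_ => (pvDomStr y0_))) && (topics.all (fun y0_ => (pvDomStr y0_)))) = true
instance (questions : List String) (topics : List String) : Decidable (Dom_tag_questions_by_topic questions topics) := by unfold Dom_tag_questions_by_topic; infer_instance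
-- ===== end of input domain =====

-- B inverts the loop nesting: a topic-major sweep in reverse topic order overwrites a tag array (earlier topics win), replacing A's per-question first-match scan with a break (objective: alternative).


-- ===== PORT A =====
-- A's inner `for topic in topics: … append; found = True; break`:
-- returns the updated tagged list and the found flag.
def tqInnerA (q : String) (tagged : List (String × String)) : List String → List (String × String) × Bool
  | [] => (tagged, false)
  | topic :: ts =>
    if PySem.Str.isIn (PySem.Str.lower topic) (PySem.Str.lower q) then
      (tagged ++ [(q, topic)], true)
    else tqInnerA q tagged ts

def tag_questions_by_topic (questions : List String) (topics : List String) : List (String × String) :=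
  questions.foldl (fun tagged q =>
    let r := tqInnerA q tagged topics
    if r.2 then r.1 else r.1 ++ [(q, "Unknown")]) []

-- ===== PORT B =====
-- the inner `for i, ql in enumerate(lowered_qs): if tl in ql: tags[i] = topic`
-- ported as a pointwise update of the tags list against the parallel lowered_qs list
def tag_questions_by_topic_alt (questions : List String) (topics : List String) : List (String × String) :=
  let lowered_qs := questions.map (fun q => PySem.Str.lower q)
  let tags := topics.reverse.foldl
    (fun (tags : List String) topic =>
      let tl := PySem.Str.lower topic
      (tags.zip lowered_qs).map (fun p => if PySem.Str.isIn tl p.2 then topic else p.1))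
    (questions.map (fun _ => "Unknown"))
  questions.zip tags

-- ===== PRECONDITION & SPEC =====
def Spec_tag_questions_by_topic (questions : List String) (topics : List String) (out : List (String × String)) : Prop := out = tag_questions_by_topic_alt questions topics
instance (questions : List String) (topics : List String) (out : List (String × String)) : Decidable (Spec_tag_questions_by_topic questions topics out) := by unfold Spec_tag_questions_by_topic; infer_instance

-- ===== CLAIM (what is proved, stated in full; the proofs are below) =====
def Claim_equal_tag_questions_by_topic : Prop := ∀ (questions : List String) (topics : List String), Dom_tag_questions_by_topic questions topics → Spec_tag_questions_by_topic questions topics (tag_questions_by_topic questions topics)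

-- ===== LEMMAS AND PROOFS =====
-- the tag per lowered question ql, as a foldr (= first matching topic, else "Unknown")
def tagOf (ql : String) (topics : List String) : String :=
  topics.foldr (fun t cur => if PySem.Str.isIn (PySem.Str.lower t) ql then t else cur) "Unknown"

-- A's inner loop plus its post-loop 'Unknown' branch appends exactly (q, tagOf (lower q) topics).
lemma tqInnerA_eq (q : String) (ts : List String) (tagged : List (String × String)) :
    (if (tqInnerA q tagged ts).2 then (tqInnerA q tagged ts).1
     else (tqInnerA q tagged ts).1 ++ [(q, "Unknown")]) =
    tagged ++ [(q, tagOf (PySem.Str.lower q) ts)] := by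
  induction ts generalizing tagged with
  | nil => simp [tqInnerA, tagOf]
  | cons t ts ih =>
    by_cases h : PySem.Str.isIn (PySem.Str.lower t) (PySem.Str.lower q) = true
    · have hC : PySem.Chars.isIn (PySem.Chars.lower t.toList) (PySem.Chars.lower q.toList) = true := by
        simpa [PySem.Str.isIn, PySem.Str.lower] using h
      simp [tqInnerA, tagOf, hC]
    · have h' : PySem.Str.isIn (PySem.Str.lower t) (PySem.Str.lower q) = false := by
        simpa using h
      have hC : PySem.Chars.isIn (PySem.Chars.lower t.toList) (PySem.Chars.lower q.toList) = false := by
        simpa [PySem.Str.isIn, PySem.Str.lower] using h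
      simp only [tqInnerA, h', Bool.false_eq_true, if_false]
      rw [ih]
      simp [tagOf, hC]

-- A's outer loop, from any accumulator, appends one tagged pair per question.
lemma outer_eq (topics : List String) (qs : List String) (acc : List (String × String)) :
    qs.foldl (fun tagged q =>
      let r := tqInnerA q tagged topics
      if r.2 then r.1 else r.1 ++ [(q, "Unknown")]) acc =
    acc ++ qs.map (fun q => (q, tagOf (PySem.Str.lower q) topics)) := by
  induction qs generalizing acc with
  | nil => simp
  | cons q qs ih =>
    simp only [List.foldl_cons, List.map_cons]
    rw [ih, tqInnerA_eq]
    simp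

-- one overwrite pass of B's inner loop over the zipped (tags, lowered_qs) stays pointwise
lemma zip_map_update (t : String) (g : String → String) (lqs : List String) :
    ((lqs.map g).zip lqs).map
      (fun p => if PySem.Str.isIn (PySem.Str.lower t) p.2 then t else p.1) =
    lqs.map (fun x => if PySem.Str.isIn (PySem.Str.lower t) x then t else g x) := by
  induction lqs with
  | nil => rfl
  | cons x xs ih => simp only [List.map_cons, List.zip_cons_cons, ih]

-- B's topic-major sweep, started from a pointwise function of lowered_qs, stays pointwise:
-- each cell folds the reversed topic list with the single-cell update.
lemma sweep_pointwise (lqs : List String) (rl : List String) (g : String → String) :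
    rl.foldl
      (fun (tags : List String) topic =>
        (tags.zip lqs).map (fun p => if PySem.Str.isIn (PySem.Str.lower topic) p.2 then topic else p.1))
      (lqs.map g) =
    lqs.map (fun x => rl.foldl
      (fun cur topic => if PySem.Str.isIn (PySem.Str.lower topic) x then topic else cur) (g x)) := by
  induction rl generalizing g with
  | nil => simp
  | cons t rl ih =>
    simp only [List.foldl_cons]
    rw [zip_map_update, ih]

-- zipping a list with a mapped copy of itself pairs each element with its image
lemma zip_self_map {A B : Type} (f : A → B) (qs : List A) :
    qs.zip (qs.map f) = qs.map (fun q => (q, f q)) := by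
  induction qs with
  | nil => rfl
  | cons q qs ih => simp [ih]

-- single cell: folding the reversed topics with overwrite = first-match foldr
lemma cell_eq (x : String) (topics : List String) :
    topics.reverse.foldl
      (fun cur topic => if PySem.Str.isIn (PySem.Str.lower topic) x then topic else cur) "Unknown" =
    tagOf x topics := by
  rw [List.foldl_reverse, tagOf]

-- ===== VERDICT (by name: the statement is the Claim_ definition above) =====
theorem tag_questions_by_topic_spec : Claim_equal_tag_questions_by_topic := by
  intro questions topics _
  unfold Spec_tag_questions_by_topic tag_questions_by_topic tag_questions_by_topic_alt
  rw [outer_eq]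
  simp only [List.nil_append]
  have hinit : questions.map (fun _ => "Unknown") =
      (questions.map (fun q => PySem.Str.lower q)).map (fun _ => "Unknown") := by
    rw [List.map_map]
    exact List.map_congr_left fun a _ => rfl
  rw [hinit, sweep_pointwise]
  simp only [List.map_map]
  rw [zip_self_map]
  apply List.map_congr_left
  intro q _
  simp only [Function.comp_apply]
  rw [cell_eq]
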